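-- pv_equiv track=rewrite | github.com/vaibhav-k/Motif-Analysis | motif-finder.py | find_seq_between_motifs
-- ===== SOURCE A (Python) =====
-- def find_seq_between_motifs(genome, motif, start, end):
-- 	sequences = []
-- 	for num in range(len(start)):
-- 		seq = ""
-- 		for i in range(start[num], end[num]):
-- 			seq += genome[i]
-- 			seq = seq.split(motif)[0]
-- 		sequences.append(seq)
-- 	return sequences
-- ===== SOURCE B (Python) =====
-- def find_seq_between_motifs(genome, motif, start, end):
--     m = len(motif)
--     sequences = []
--     for s, e in zip(start, end):
--         seg = "".join(genome[i] for i in range(s, e))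
--         if m:
--             pos = seg.find(motif)
--             while pos >= 0:
--                 seg = seg[:pos] + seg[pos + m:]
--                 pos = seg.find(motif)
--         sequences.append(seg)
--     return sequences
-- ===== Notes on version B (the rewrite author's own statement) =====
-- stated objective: alternative
-- what changed: B builds each genome segment in full first (join over the index range) and then erases motif occurrences with a find-and-cut loop (seg.find(motif), splice the match out, rescan), instead of A's interleaved per-character rebuild that re-runs str.split(motif) on the whole growing buffer after every appended character; leftmost find-and-cut provably yields the same string as A's incremental splitting.
import Mathlib
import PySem

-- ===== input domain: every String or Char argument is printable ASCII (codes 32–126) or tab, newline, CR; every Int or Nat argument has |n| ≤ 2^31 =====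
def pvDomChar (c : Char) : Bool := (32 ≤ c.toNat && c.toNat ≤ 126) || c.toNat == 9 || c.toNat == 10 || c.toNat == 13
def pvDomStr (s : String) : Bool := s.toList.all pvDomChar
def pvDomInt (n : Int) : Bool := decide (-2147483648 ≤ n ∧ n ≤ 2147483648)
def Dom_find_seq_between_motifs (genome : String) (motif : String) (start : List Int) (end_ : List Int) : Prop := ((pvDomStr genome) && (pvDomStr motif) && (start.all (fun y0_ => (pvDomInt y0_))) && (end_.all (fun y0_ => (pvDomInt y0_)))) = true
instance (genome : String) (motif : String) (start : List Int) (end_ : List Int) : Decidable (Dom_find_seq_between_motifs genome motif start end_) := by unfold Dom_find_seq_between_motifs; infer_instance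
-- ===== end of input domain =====

-- B materialises each segment once and erases motif occurrences by a find-and-cut scan,
-- instead of A's per-character rebuild that re-splits the whole buffer after every character.
-- ===== PORT A =====
def find_seq_between_motifs (genome : String) (motif : String) (start : List Int) (end_ : List Int) : List String :=
  -- sequences = []; for num in range(len(start)): seq = ""; for i in range(start[num], end[num]): …
  (List.range start.length).foldl
    (fun sequences (num : Nat) =>
      sequences ++
        [String.ofList
          ((PySem.List.pyRange (PySem.List.pyGetD start (num : Int) 0)
              (PySem.List.pyGetD end_ (num : Int) 0) 1).foldl
            (fun seq i =>
              -- seq += genome[i]   (IndexError = pyGet? none, excluded by Pre_)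
              let seq := seq ++ (PySem.List.pyGet? genome.toList i).elim [] (fun c => [c])
              -- seq = seq.split(motif)[0]   (ValueError for motif = "" = split? none, excluded by Pre_)
              ((PySem.Chars.split? seq motif.toList).getD [seq]).headD [])
            [])])
    []

-- ===== PORT B =====
-- while pos >= 0: seg = seg[:pos] + seg[pos+m:]; pos = seg.find(motif)   (each cut removes
-- m ≥ 1 chars, so seg.length+1 units of fuel bound the loop; fuel only makes it structural)
def removeAllF (m : List Char) : Nat → List Char → List Char
  | 0, seg => seg
  | fuel + 1, seg =>
    if 0 ≤ PySem.Chars.find seg m then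
      removeAllF m fuel
        (PySem.List.slice seg none (some (PySem.Chars.find seg m)) ++
          PySem.List.slice seg (some (PySem.Chars.find seg m + (m.length : Int))) none)
    else seg

def find_seq_between_motifs_alt (genome : String) (motif : String) (start : List Int) (end_ : List Int) : List String :=
  (start.zip end_).foldl
    (fun sequences se =>
      -- seg = "".join(genome[i] for i in range(s, e))
      let seg := (PySem.List.pyRange se.1 se.2 1).flatMap
        (fun i => (PySem.List.pyGet? genome.toList i).elim [] (fun c => [c]))
      -- if m: <find-and-cut loop>
      sequences ++
        [String.ofList
          (if motif.toList.length ≠ 0 then removeAllF motif.toList (seg.length + 1) seg else seg)])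
    []

-- ===== PRECONDITION & SPEC =====
-- Pre_ = exactly the inputs where the Python A returns: end_ at least as long as start (else
-- IndexError on end[num]), every visited index a valid Python index of genome (else IndexError),
-- and motif nonempty whenever some range is nonempty (else ValueError: empty separator).
def Pre_find_seq_between_motifs (genome : String) (motif : String) (start : List Int) (end_ : List Int) : Prop :=
  start.length ≤ end_.length ∧
  ∀ n < start.length, start.getD n 0 < end_.getD n 0 →
    motif ≠ "" ∧ -(genome.toList.length : Int) ≤ start.getD n 0 ∧
      end_.getD n 0 ≤ genome.toList.length
instance (genome : String) (motif : String) (start : List Int) (end_ : List Int) : Decidable (Pre_find_seq_between_motifs genome motif start end_) := by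
  unfold Pre_find_seq_between_motifs; infer_instance
def pvWitness_find_seq_between_motifs : String × String × List Int × List Int := ("acgtacg", "cg", [0, 2], [7, 5])
def Spec_find_seq_between_motifs (genome : String) (motif : String) (start : List Int) (end_ : List Int) (out : List String) : Prop := out = find_seq_between_motifs_alt genome motif start end_
instance (genome : String) (motif : String) (start : List Int) (end_ : List Int) (out : List String) : Decidable (Spec_find_seq_between_motifs genome motif start end_ out) := by unfold Spec_find_seq_between_motifs; infer_instance

-- ===== CLAIM (what is proved, stated in full; the proofs are below) =====
def Claim_equal_find_seq_between_motifs : Prop := ∀ (genome : String) (motif : String) (start : List Int) (end_ : List Int), Dom_find_seq_between_motifs genome motif start end_ → Pre_find_seq_between_motifs genome motif start end_ → Spec_find_seq_between_motifs genome motif start end_ (find_seq_between_motifs genome motif start end_)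

-- ===== LEMMAS AND PROOFS =====

-- head of PySem.Chars.splitOn, mirrored as a plain recursion (same match order as splitOn.go)
def headPre (sep : List Char) : Nat → List Char → List Char
  | 0, l => l
  | _ + 1, [] => []
  | fuel + 1, c :: rest =>
    if sep.isPrefixOf (c :: rest) then [] else c :: headPre sep fuel rest

theorem go_head_acc (sep : List Char) (fuel : Nat) :
    ∀ (l cur : List Char) (a : List Char) (acc : List (List Char)),
      (PySem.Chars.splitOn.go sep fuel l cur (a :: acc)).head? = (a :: acc).getLast? := by
  induction fuel with
  | zero =>
    intro l cur a acc
    simp [PySem.Chars.splitOn.go, List.head?_reverse, List.getLast?_cons]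
  | succ f ih =>
    intro l cur a acc
    cases l with
    | nil => simp [PySem.Chars.splitOn.go, List.head?_reverse, List.getLast?_cons]
    | cons c rest =>
      rw [PySem.Chars.splitOn.go]
      split
      · rw [ih]; exact List.getLast?_cons_cons
      · exact ih rest (c :: cur) a acc

theorem go_head_nil (sep : List Char) (fuel : Nat) :
    ∀ (l cur : List Char),
      (PySem.Chars.splitOn.go sep fuel l cur []).head? = some (cur.reverse ++ headPre sep fuel l) := by
  induction fuel with
  | zero => intro l cur; simp [PySem.Chars.splitOn.go, headPre]
  | succ f ih =>
    intro l cur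
    cases l with
    | nil => simp [PySem.Chars.splitOn.go, headPre]
    | cons c rest =>
      rw [PySem.Chars.splitOn.go, headPre]
      split
      · rw [go_head_acc]; simp
      · rw [ih rest (c :: cur)]; simp

theorem splitOn_head (s sep : List Char) :
    (PySem.Chars.splitOn s sep).head? = some (headPre sep (s.length + 1) s) := by
  rw [PySem.Chars.splitOn, go_head_nil]; simp

theorem headPre_of_not_infix (sep : List Char) (fuel : Nat) :
    ∀ l : List Char, ¬ sep <:+: l → l.length ≤ fuel → headPre sep fuel l = l := by
  induction fuel with
  | zero => intro l _ _; rfl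
  | succ f ih =>
    intro l hni hlen
    cases l with
    | nil => rfl
    | cons c rest =>
      rw [headPre]
      have hp : ¬ sep.isPrefixOf (c :: rest) = true := by
        intro h
        exact hni ((List.isPrefixOf_iff_prefix.mp h).isInfix)
      rw [if_neg hp]
      have : headPre sep f rest = rest := by
        refine ih rest (fun hi => hni (hi.trans (List.infix_cons (List.infix_refl rest)))) ?_
        simpa using Nat.le_of_succ_le_succ hlen
      rw [this]

theorem headPre_first (sep : List Char) (hsep : sep ≠ []) :
    ∀ (p : List Char) (t : List Char) (fuel : Nat), t = p ++ sep →
      (∀ i < p.length, ¬ sep <+: t.drop i) → p.length < fuel → headPre sep fuel t = p := by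
  intro p
  induction p with
  | nil =>
    intro t fuel ht _ hfuel
    cases fuel with
    | zero => omega
    | succ f =>
      simp only [List.nil_append] at ht
      cases sep with
      | nil => exact absurd rfl hsep
      | cons c rest =>
        subst ht
        rw [headPre, if_pos (List.isPrefixOf_iff_prefix.mpr (List.prefix_refl _))]
  | cons a p' ih =>
    intro t fuel ht hocc hfuel
    cases fuel with
    | zero => omega
    | succ f =>
      subst ht
      simp only [List.cons_append]
      rw [headPre]
      have hnp : ¬ sep.isPrefixOf (a :: (p' ++ sep)) = true := by
        intro h
        exact hocc 0 (by simp) (by simpa using List.isPrefixOf_iff_prefix.mp h)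
      rw [if_neg hnp]
      have : headPre sep f (p' ++ sep) = p' := by
        refine ih (p' ++ sep) f rfl (fun i hi hpre => ?_) (by simpa using Nat.lt_of_succ_lt_succ hfuel)
        exact hocc (i + 1) (by simpa using Nat.succ_lt_succ hi) (by simpa using hpre)
      rw [this]

-- an occurrence of m in seq ++ tail that fits inside seq is an occurrence in seq
theorem occ_in_prefix (m seq tail : List Char) (i : Nat)
    (hlen : i + m.length ≤ seq.length) (h : m <+: (seq ++ tail).drop i) : m <:+: seq := by
  have hdrop : (seq ++ tail).drop i = seq.drop i ++ tail := by
    rw [List.drop_append_of_le_length (by omega)]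
  rw [hdrop] at h
  have hps : seq.drop i <+: seq.drop i ++ tail := ⟨tail, rfl⟩
  have hm : m <+: seq.drop i :=
    List.prefix_of_prefix_length_le h hps (by simp; omega)
  exact List.infix_iff_prefix_suffix.mpr ⟨seq.drop i, hm, List.drop_suffix i seq⟩

-- no suffix occurrence + motif-free seq ⇒ motif-free seq ++ [c]
theorem not_infix_of_not_suffix (m seq : List Char) (c : Char) (hm : m ≠ [])
    (hfree : ¬ m <:+: seq) (hsuf : ¬ m <:+ (seq ++ [c])) : ¬ m <:+: (seq ++ [c]) := by
  intro hinf
  have := (PySem.Chars.isIn_iff_infix m (seq ++ [c])).mpr hinf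
  obtain ⟨j, hj⟩ := (PySem.Chars.exists_prefix_drop_iff_isIn m (seq ++ [c])).mpr this
  by_cases hsmall : j + m.length ≤ seq.length
  · exact hfree (occ_in_prefix m seq [c] j hsmall hj)
  · have hjlen : j ≤ seq.length := by
      by_contra hjl
      have : (seq ++ [c]).drop j = [] := by
        apply List.drop_eq_nil_of_le; simp; omega
      rw [this] at hj
      exact hm (List.prefix_nil.mp hj)
    have hdl : ((seq ++ [c]).drop j).length ≤ m.length := by simp; omega
    have hme : m = (seq ++ [c]).drop j := List.IsPrefix.eq_of_length_le hj hdl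
    exact hsuf (hme ▸ List.drop_suffix j (seq ++ [c]))

-- the key step equality: on a motif-free buffer, split-and-take-head = suffix-truncate
theorem step_eq (m seq : List Char) (c : Char) (hm : m ≠ []) (hfree : ¬ m <:+: seq) :
    (PySem.Chars.splitOn (seq ++ [c]) m).head? =
      some (if (seq ++ [c]).drop ((seq ++ [c]).length - m.length) = m
            then (seq ++ [c]).take ((seq ++ [c]).length - m.length) else (seq ++ [c])) := by
  set t := seq ++ [c] with ht
  rw [splitOn_head]
  by_cases hsuf : m <:+ t
  · obtain ⟨p, hp⟩ := hsuf
    have hplen : p.length = t.length - m.length := by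
      have := congrArg List.length hp; simp at this; omega
    have hcond : t.drop (t.length - m.length) = m := (List.suffix_iff_eq_drop.mp ⟨p, hp⟩).symm
    rw [if_pos hcond]
    have hheads : headPre m (t.length + 1) t = p := by
      refine headPre_first m hm p t (t.length + 1) hp.symm (fun i hi hpre => ?_) (by omega)
      have hfit : i + m.length ≤ seq.length := by
        have ht1 : t.length = seq.length + 1 := by rw [ht]; simp
        omega
      exact hfree (occ_in_prefix m seq [c] i hfit (ht ▸ hpre))
    rw [hheads]
    congr 1
    rw [← hplen, ← hp, List.take_left]
  · have hni : ¬ m <:+: t := not_infix_of_not_suffix m seq c hm hfree hsuf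
    have hcond : ¬ t.drop (t.length - m.length) = m := by
      intro h
      exact hsuf (List.suffix_iff_eq_drop.mpr h.symm)
    rw [if_neg hcond, headPre_of_not_infix m (t.length + 1) t hni (by omega)]

-- the truncated buffer stays motif-free
theorem step_free (m seq : List Char) (c : Char) (hm : m ≠ []) (hfree : ¬ m <:+: seq) :
    ¬ m <:+: (if (seq ++ [c]).drop ((seq ++ [c]).length - m.length) = m
              then (seq ++ [c]).take ((seq ++ [c]).length - m.length) else (seq ++ [c])) := by
  set t := seq ++ [c] with ht
  by_cases hcond : t.drop (t.length - m.length) = m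
  · rw [if_pos hcond]
    intro hinf
    apply hfree
    have hsuf : m <:+ t := List.suffix_iff_eq_drop.mpr hcond.symm
    obtain ⟨p, hp⟩ := hsuf
    have hplen : p.length = t.length - m.length := by
      have := congrArg List.length hp; simp at this; omega
    have htake : t.take (t.length - m.length) = p := by rw [← hplen, ← hp, List.take_left]
    rw [htake] at hinf
    have hpseq : p <+: seq := by
      refine List.prefix_of_prefix_length_le ⟨m, hp⟩ ⟨[c], rfl⟩ ?_
      have ht1 : t.length = seq.length + 1 := by rw [ht]; simp
      have hm1 : 1 ≤ m.length := by
        cases m with | nil => exact absurd rfl hm | cons _ _ => simp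
      omega
    exact hinf.trans hpseq.isInfix
  · rw [if_neg hcond]
    exact not_infix_of_not_suffix m seq c hm hfree
      (fun hs => hcond (List.suffix_iff_eq_drop.mp hs).symm)

-- B's find-and-cut never fires on a motif-free segment
theorem removeAllF_not_infix (m : List Char) (fuel : Nat) (seg : List Char)
    (hfree : ¬ m <:+: seg) : removeAllF m fuel seg = seg := by
  cases fuel with
  | zero => rfl
  | succ f =>
    rw [removeAllF, if_neg]
    intro h
    exact hfree ((PySem.Chars.find_nonneg_iff seg m).mp h)

-- the cut written as take/drop
theorem cut_eq (m seg : List Char) (h : 0 ≤ PySem.Chars.find seg m) :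
    PySem.List.slice seg none (some (PySem.Chars.find seg m)) ++
      PySem.List.slice seg (some (PySem.Chars.find seg m + (m.length : Int))) none =
    seg.take (PySem.Chars.find seg m).toNat ++
      seg.drop ((PySem.Chars.find seg m).toNat + m.length) := by
  rw [PySem.List.slice_to seg h, PySem.List.slice_from seg (by omega : (0:Int) ≤ PySem.Chars.find seg m + (m.length : Int))]
  have htn : (PySem.Chars.find seg m + (m.length : Int)).toNat = (PySem.Chars.find seg m).toNat + m.length := by omega
  rw [htn]

-- cutting the just-completed suffix occurrence = one find-and-cut step of B
theorem removeAllF_cut (m : List Char) (hm : m ≠ []) (seq seq' rest : List Char) (c : Char)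
    (hfree : ¬ m <:+: seq) (hcut : seq ++ [c] = seq' ++ m) (fuel : Nat) :
    removeAllF m (fuel + 1) (seq ++ [c] ++ rest) = removeAllF m fuel (seq' ++ rest) := by
  have hlens : seq'.length + m.length = seq.length + 1 := by
    have := congrArg List.length hcut; simp at this; omega
  have ht : seq ++ [c] ++ rest = seq' ++ (m ++ rest) := by
    rw [hcut, List.append_assoc]
  have hocc : m <+: (seq ++ [c] ++ rest).drop seq'.length := by
    rw [ht, List.drop_left]
    exact ⟨rest, rfl⟩
  have hinf : m <:+: (seq ++ [c] ++ rest) := by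
    rw [← PySem.Chars.isIn_iff_infix]
    exact (PySem.Chars.exists_prefix_drop_iff_isIn m _).mp ⟨seq'.length, hocc⟩
  have hpos : 0 ≤ PySem.Chars.find (seq ++ [c] ++ rest) m :=
    (PySem.Chars.find_nonneg_iff _ m).mpr hinf
  have hsp := PySem.Chars.find_spec hpos
  have hm1 : 1 ≤ m.length := by
    cases m with | nil => exact absurd rfl hm | cons _ _ => simp
  have hfind : (PySem.Chars.find (seq ++ [c] ++ rest) m).toNat = seq'.length := by
    by_contra hne
    rcases Nat.lt_or_ge (PySem.Chars.find (seq ++ [c] ++ rest) m).toNat seq'.length with hlt | hge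
    · refine hfree (occ_in_prefix m seq ([c] ++ rest)
        (PySem.Chars.find (seq ++ [c] ++ rest) m).toNat (by omega) ?_)
      rw [← List.append_assoc]
      exact hsp.1
    · exact hsp.2 seq'.length (by omega) hocc
  rw [removeAllF, if_pos hpos, cut_eq m _ hpos, hfind]
  have h1 : (seq ++ [c] ++ rest).take seq'.length = seq' := by
    rw [ht, List.take_left]
  have h2 : (seq ++ [c] ++ rest).drop (seq'.length + m.length) = rest := by
    rw [ht, ← List.append_assoc, show seq'.length + m.length = (seq' ++ m).length by simp,
      List.drop_left]
  rw [h1, h2]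

-- A's inner loop = build-then-cut, over any index list of valid genome indices
theorem loop_eq (g m : List Char) (hm : m ≠ []) :
    ∀ (L : List Int) (seq : List Char) (fuel : Nat),
      (∀ i ∈ L, PySem.Raise.InRange g.length i) → ¬ m <:+: seq →
      (seq ++ L.flatMap (fun i => (PySem.List.pyGet? g i).elim [] (fun c => [c]))).length ≤ fuel →
      L.foldl (fun seq i =>
          let seq := seq ++ (PySem.List.pyGet? g i).elim [] (fun c => [c])
          ((PySem.Chars.split? seq m).getD [seq]).headD []) seq =
      removeAllF m fuel
        (seq ++ L.flatMap (fun i => (PySem.List.pyGet? g i).elim [] (fun c => [c]))) := by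
  intro L
  induction L with
  | nil =>
    intro seq fuel _ hfree _
    simp only [List.flatMap_nil, List.append_nil, List.foldl_nil]
    exact (removeAllF_not_infix m fuel seq hfree).symm
  | cons i L' ih =>
    intro seq fuel hL hfree hfuel
    have hin : PySem.Raise.InRange g.length i := hL i (by simp)
    obtain ⟨c, hc⟩ : ∃ c, PySem.List.pyGet? g i = some c := by
      obtain ⟨h1, h2⟩ := hin
      rcases Int.lt_or_le i 0 with hneg | hpos
      · rw [PySem.List.pyGet?_neg g hneg h1]
        have hlt : g.length - (-i).toNat < g.length := by omega
        exact ⟨g[g.length - (-i).toNat], by rw [List.getElem?_eq_getElem hlt]⟩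
      · rw [PySem.List.pyGet?_of_nonneg g hpos]
        have hlt : i.toNat < g.length := by omega
        exact ⟨g[i.toNat], by rw [List.getElem?_eq_getElem hlt]⟩
    simp only [List.foldl_cons, List.flatMap_cons, hc, Option.elim_some] at hfuel ⊢
    have hstep : ((PySem.Chars.split? (seq ++ [c]) m).getD [seq ++ [c]]).headD [] =
        (if (seq ++ [c]).drop ((seq ++ [c]).length - m.length) = m
         then (seq ++ [c]).take ((seq ++ [c]).length - m.length) else (seq ++ [c])) := by
      rw [PySem.Chars.split?, if_neg (by simpa [List.isEmpty_iff] using hm), Option.getD_some]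
      have hse := step_eq m seq c hm hfree
      cases hh : PySem.Chars.splitOn (seq ++ [c]) m with
      | nil => rw [hh] at hse; simp at hse
      | cons x restl =>
        rw [hh] at hse
        simp only [List.head?_cons, Option.some.injEq] at hse
        rw [List.headD_cons]
        exact hse
    rw [hstep]
    have hfree' := step_free m seq c hm hfree
    by_cases hcond : (seq ++ [c]).drop ((seq ++ [c]).length - m.length) = m
    · rw [if_pos hcond] at hfree' ⊢
      have hcut : seq ++ [c] = (seq ++ [c]).take ((seq ++ [c]).length - m.length) ++ m := by
        conv_lhs => rw [← List.take_append_drop ((seq ++ [c]).length - m.length) (seq ++ [c])]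
        rw [hcond]
      have hm1 : 1 ≤ m.length := by
        cases m with | nil => exact absurd rfl hm | cons _ _ => simp
      have hsuf : m <:+ seq ++ [c] := List.suffix_iff_eq_drop.mpr hcond.symm
      have hmlen : m.length ≤ (seq ++ [c]).length := hsuf.length_le
      cases fuel with
      | zero => simp at hfuel
      | succ f =>
        rw [show seq ++ ([c] ++ L'.flatMap (fun i => (PySem.List.pyGet? g i).elim [] (fun c => [c]))) =
              seq ++ [c] ++ L'.flatMap (fun i => (PySem.List.pyGet? g i).elim [] (fun c => [c])) by
            rw [List.append_assoc]]
        rw [removeAllF_cut m hm seq _ _ c hfree hcut f]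
        refine ih _ f (fun j hj => hL j (by simp [hj])) hfree' ?_
        have hgl : ((seq ++ [c]).take ((seq ++ [c]).length - m.length) ++
            L'.flatMap (fun i => (PySem.List.pyGet? g i).elim [] (fun c => [c]))).length =
            (seq ++ [c]).length - m.length +
              (L'.flatMap (fun i => (PySem.List.pyGet? g i).elim [] (fun c => [c]))).length := by
          rw [List.length_append, List.length_take]; omega
        have hfl : (seq ++ ([c] ++
            L'.flatMap (fun i => (PySem.List.pyGet? g i).elim [] (fun c => [c])))).length =
            seq.length + 1 +
              (L'.flatMap (fun i => (PySem.List.pyGet? g i).elim [] (fun c => [c]))).length := by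
          rw [List.length_append, List.length_append, List.length_cons, List.length_nil]; omega
        have hsl : (seq ++ [c]).length = seq.length + 1 := by simp
        rw [hgl]
        rw [hfl] at hfuel
        omega
    · rw [if_neg hcond] at hfree' ⊢
      rw [show seq ++ ([c] ++ L'.flatMap (fun i => (PySem.List.pyGet? g i).elim [] (fun c => [c]))) =
            seq ++ [c] ++ L'.flatMap (fun i => (PySem.List.pyGet? g i).elim [] (fun c => [c])) by
          rw [List.append_assoc]]
      refine ih _ fuel (fun j hj => hL j (by simp [hj])) hfree' ?_
      simpa [List.append_assoc] using hfuel

-- outer loop: A's range-indexed fold appending one piece per index = a zip fold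
theorem outer_eq (F G : Int → Int → String) (C : Int → Int → Prop)
    (hFG : ∀ s e, C s e → F s e = G s e) :
    ∀ (start end_ : List Int), start.length ≤ end_.length →
      (∀ n < start.length, C (start.getD n 0) (end_.getD n 0)) →
      ∀ acc : List String,
        (List.range start.length).foldl
          (fun sequences num => sequences ++ [F (start.getD num 0) (end_.getD num 0)]) acc =
          acc ++ (start.zip end_).map (fun p => G p.1 p.2) := by
  intro start
  induction start with
  | nil => intro end_ _ _ acc; simp
  | cons s st ih =>
    intro end_ hlen hC acc
    cases end_ with
    | nil => simp at hlen
    | cons e en =>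
      simp only [List.length_cons, List.range_succ_eq_map, List.foldl_cons, List.foldl_map,
        List.zip_cons_cons, List.map_cons, Nat.succ_eq_add_one, List.getD_cons_succ,
        List.getD_cons_zero]
      rw [ih en (by simpa using hlen)
        (fun n hn => by simpa using hC (n + 1) (by simpa using Nat.succ_lt_succ hn))
        (acc ++ [F s e])]
      rw [hFG s e (by simpa using hC 0 (by simp))]
      simp

-- ===== VERDICT (by name: the statement is the Claim_ definition above) =====
theorem find_seq_between_motifs_spec : Claim_equal_find_seq_between_motifs := by
  intro genome motif start end_ _ hpre
  obtain ⟨hlen, hbnd⟩ := hpre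
  have hidx : ∀ n < start.length, ∀ i ∈ PySem.List.pyRange (start.getD n 0) (end_.getD n 0) 1,
      motif ≠ "" ∧ PySem.Raise.InRange genome.toList.length i := by
    intro n hn i hi
    rw [PySem.List.mem_pyRange_one] at hi
    have h := hbnd n hn (by omega)
    exact ⟨h.1, by unfold PySem.Raise.InRange; omega⟩
  unfold Spec_find_seq_between_motifs find_seq_between_motifs find_seq_between_motifs_alt
  simp only [PySem.List.pyGetD_natCast]
  rw [PySem.List.foldl_append_singleton_eq_map (l := start.zip end_)
    (f := fun se => String.ofList
      (if motif.toList.length ≠ 0 then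
        removeAllF motif.toList
          (((PySem.List.pyRange se.1 se.2 1).flatMap
            (fun i => (PySem.List.pyGet? genome.toList i).elim [] (fun c => [c]))).length + 1)
          ((PySem.List.pyRange se.1 se.2 1).flatMap
            (fun i => (PySem.List.pyGet? genome.toList i).elim [] (fun c => [c])))
       else (PySem.List.pyRange se.1 se.2 1).flatMap
            (fun i => (PySem.List.pyGet? genome.toList i).elim [] (fun c => [c]))))]
  refine outer_eq
    (fun s e => String.ofList ((PySem.List.pyRange s e 1).foldl
      (fun seq i =>
        let seq := seq ++ (PySem.List.pyGet? genome.toList i).elim [] (fun c => [c])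
        ((PySem.Chars.split? seq motif.toList).getD [seq]).headD []) []))
    (fun s e => String.ofList
      (if motif.toList.length ≠ 0 then
        removeAllF motif.toList
          (((PySem.List.pyRange s e 1).flatMap
            (fun i => (PySem.List.pyGet? genome.toList i).elim [] (fun c => [c]))).length + 1)
          ((PySem.List.pyRange s e 1).flatMap
            (fun i => (PySem.List.pyGet? genome.toList i).elim [] (fun c => [c])))
       else (PySem.List.pyRange s e 1).flatMap
            (fun i => (PySem.List.pyGet? genome.toList i).elim [] (fun c => [c]))))
    (fun s e => ∀ i ∈ PySem.List.pyRange s e 1,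
      motif ≠ "" ∧ PySem.Raise.InRange genome.toList.length i)
    (fun s e hC => ?_) start end_ hlen hidx []
  beta_reduce
  by_cases hrange : PySem.List.pyRange s e 1 = []
  · rw [hrange]
    simp only [List.flatMap_nil, List.foldl_nil]
    by_cases hm0 : motif.toList.length ≠ 0
    · rw [if_pos hm0, removeAllF_not_infix motif.toList _ [] (by
        rw [List.infix_nil]; intro h; exact hm0 (by rw [h]; rfl))]
    · rw [if_neg hm0]
  · obtain ⟨i0, hi0⟩ := List.exists_mem_of_ne_nil _ hrange
    have hmot : motif ≠ "" := (hC i0 hi0).1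
    have hm : motif.toList ≠ [] := fun h => hmot (String.toList_eq_nil_iff.mp h)
    rw [if_pos (fun h0 => hm (List.length_eq_zero_iff.mp h0))]
    refine congrArg String.ofList ?_
    have := loop_eq genome.toList motif.toList hm (PySem.List.pyRange s e 1) []
      (((PySem.List.pyRange s e 1).flatMap
        (fun i => (PySem.List.pyGet? genome.toList i).elim [] (fun c => [c]))).length + 1)
      (fun j hj => (hC j hj).2) (by rw [List.infix_nil]; exact hm) (by simp)
    simpa using this
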